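-- pv_equiv track=rewrite | github.com/WithoutHaste/RecreationalMath | pythonGenerators/generate_practical.py | increment_and_return_permutation
-- ===== SOURCE A (Python) =====
-- def increment_and_return_permutation(next_permutation, divisors):
-- 	""" Increments next_permutation """
-- 	""" Then returns the resulting permutation of divisors """
-- 	# increment permutation
-- 	i = len(next_permutation) - 1
-- 	if next_permutation[i] == 0:
-- 		next_permutation[i] = 1
-- 	else:
-- 		while i >= 0 and next_permutation[i] == 1:
-- 			next_permutation[i] = 0
-- 			i = i - 1
-- 		if i >= 0:
-- 			next_permutation[i] = 1
-- 	# get resulting permutation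
-- 	result = []
-- 	for i in range(len(divisors)):
-- 		if next_permutation[i] == 1:
-- 			result.append(divisors[i])
-- 	return result
-- ===== SOURCE B (Python) =====
-- def _inc(rev_bits):
--     """Recursive increment of a binary counter given least-significant-first;
--     returns a new list (the carry propagates through the leading 1s)."""
--     if not rev_bits:
--         return []
--     if rev_bits[0] == 1:
--         return [0] + _inc(rev_bits[1:])
--     return [1] + rev_bits[1:]
--
-- def increment_and_return_permutation(next_permutation, divisors):
--     """Increments next_permutation, then returns the resulting permutation of divisors.
--     Recursive decomposition: reverse to least-significant-first, increment
--     structurally, reverse back; then select divisors by zipping."""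
--     updated = _inc(next_permutation[::-1])[::-1]
--     next_permutation[:] = updated
--     return [d for b, d in zip(updated, divisors) if b == 1]
-- ===== Notes on version B (the rewrite author's own statement) =====
-- stated objective: alternative
-- what changed: Replaces A's index-based in-place carry while-loop by a pure structural recursion over the reversed (least-significant-first) list that returns a fresh incremented list, and replaces the index loop over range(len(divisors)) by zip-filtering the updated list against divisors.
import Mathlib
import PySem

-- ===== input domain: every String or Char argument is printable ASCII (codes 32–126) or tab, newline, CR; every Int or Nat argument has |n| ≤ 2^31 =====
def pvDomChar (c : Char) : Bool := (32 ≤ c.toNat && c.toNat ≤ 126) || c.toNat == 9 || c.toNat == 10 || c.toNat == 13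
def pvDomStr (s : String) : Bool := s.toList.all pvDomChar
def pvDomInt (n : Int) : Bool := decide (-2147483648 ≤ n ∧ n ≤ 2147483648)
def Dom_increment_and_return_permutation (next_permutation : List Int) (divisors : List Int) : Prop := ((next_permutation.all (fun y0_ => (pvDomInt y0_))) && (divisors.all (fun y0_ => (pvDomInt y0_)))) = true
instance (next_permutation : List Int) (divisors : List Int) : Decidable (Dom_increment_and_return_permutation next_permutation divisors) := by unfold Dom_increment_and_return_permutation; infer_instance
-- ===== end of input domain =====

-- B replaces A's index-based in-place carry while-loop by a pure structural recursion over
-- the reversed (least-significant-first) list, and selects divisors by zip-filtering instead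
-- of an index loop ("alternative"). In Python both A and B leave next_permutation with the
-- same final contents; the theorems are about the return value only.


-- ===== PORT A =====
-- 'while i >= 0 and next_permutation[i] == 1: next_permutation[i] = 0; i = i - 1'
-- fuel = len + 1 suffices (i starts at len - 1 and strictly decreases); pyGetD/pySetD are
-- exact here because the loop guard keeps every executed index in range inside Pre_.
def pvALoop (np : List Int) (i : Int) : Nat → List Int × Int
  | 0 => (np, i)
  | fuel + 1 =>
    if 0 ≤ i ∧ PySem.List.pyGetD np i 0 = 1 then
      pvALoop (PySem.List.pySetD np i 0) (i - 1) fuel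
    else (np, i)

def increment_and_return_permutation (next_permutation : List Int) (divisors : List Int) : List Int :=
  let i : Int := (next_permutation.length : Int) - 1
  let np1 : List Int :=
    if PySem.List.pyGetD next_permutation i 0 = 0 then
      PySem.List.pySetD next_permutation i 1
    else
      let r := pvALoop next_permutation i (next_permutation.length + 1)
      if 0 ≤ r.2 then PySem.List.pySetD r.1 r.2 1 else r.1
  -- 'for i in range(len(divisors)): if next_permutation[i] == 1: result.append(divisors[i])'
  (PySem.List.pyRange 0 (divisors.length : Int) 1).foldl
    (fun acc j => if PySem.List.pyGetD np1 j 0 = 1 then acc ++ [PySem.List.pyGetD divisors j 0] else acc) []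

-- ===== PORT B =====
-- '_inc(rev_bits)': structural recursion on the least-significant-first list
def pvInc : List Int → List Int
  | [] => []
  | h :: t => if h = 1 then 0 :: pvInc t else 1 :: t

def increment_and_return_permutation_alt (next_permutation : List Int) (divisors : List Int) : List Int :=
  let updated := (pvInc next_permutation.reverse).reverse
  -- '[d for b, d in zip(updated, divisors) if b == 1]'
  ((updated.zip divisors).filter (fun bd => bd.1 = 1)).map Prod.snd

-- ===== PRECONDITION & SPEC =====
-- A raises IndexError on an empty next_permutation (next_permutation[-1] on []) and whenever
-- divisors is longer than next_permutation (the result loop reads past the end).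
def Pre_increment_and_return_permutation (next_permutation : List Int) (divisors : List Int) : Prop :=
  next_permutation ≠ [] ∧ divisors.length ≤ next_permutation.length
instance (next_permutation : List Int) (divisors : List Int) : Decidable (Pre_increment_and_return_permutation next_permutation divisors) := by unfold Pre_increment_and_return_permutation; infer_instance

def pvWitness_increment_and_return_permutation : List Int × List Int := ([0, 1, 1], [2, 3, 5])

def Spec_increment_and_return_permutation (next_permutation : List Int) (divisors : List Int) (out : List Int) : Prop := out = increment_and_return_permutation_alt next_permutation divisors
instance (next_permutation : List Int) (divisors : List Int) (out : List Int) : Decidable (Spec_increment_and_return_permutation next_permutation divisors out) := by unfold Spec_increment_and_return_permutation; infer_instance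

-- ===== CLAIM (what is proved, stated in full; the proofs are below) =====
def Claim_equal_increment_and_return_permutation : Prop := ∀ (next_permutation : List Int) (divisors : List Int), Dom_increment_and_return_permutation next_permutation divisors → Pre_increment_and_return_permutation next_permutation divisors → Spec_increment_and_return_permutation next_permutation divisors (increment_and_return_permutation next_permutation divisors)

-- ===== LEMMAS AND PROOFS =====

-- pvK np m = length of the trailing run of 1s in np.take m
def pvK (np : List Int) : Nat → Nat
  | 0 => 0
  | m + 1 => if np.getD m 0 = 1 then pvK np m + 1 else 0

-- the common canonical form of the updated counter: zero the maximal trailing run of 1s,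
-- set the cell before it (if any) to 1
def pvForm (np : List Int) : List Int :=
  if pvK np np.length = np.length then List.replicate np.length 0
  else np.take (np.length - pvK np np.length - 1) ++ 1 :: List.replicate (pvK np np.length) 0

lemma pvK_le (np : List Int) (m : Nat) : pvK np m ≤ m := by
  induction m with
  | zero => simp [pvK]
  | succ m ih => simp only [pvK]; split <;> omega

lemma pvK_congr (np np' : List Int) (m : Nat)
    (h : ∀ j, j < m → np'.getD j 0 = np.getD j 0) : pvK np' m = pvK np m := by
  induction m with
  | zero => rfl
  | succ m ih => simp only [pvK, h m (by omega), ih (fun j hj => h j (by omega))]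

lemma pvK_pos_head (np : List Int) (m : Nat) (h : np.getD m 0 = 1) :
    pvK np (m + 1) = pvK np m + 1 := by simp only [pvK, if_pos h]

lemma pvK_zero_head (np : List Int) (m : Nat) (h : ¬ np.getD m 0 = 1) :
    pvK np (m + 1) = 0 := by simp only [pvK, if_neg h]

-- the final contents of A's zeroing loop, written exactly the way the loop produces them
def pvZero : List Int → Nat → Nat → List Int
  | np, _, 0 => np
  | np, m, k + 1 => pvZero (np.set (m - 1) 0) (m - 1) k

lemma pvALoop_spec (np : List Int) (m fuel : Nat) (hm : m ≤ np.length) (hf : m < fuel) :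
    pvALoop np ((m : Int) - 1) fuel
      = (pvZero np m (pvK np m), (m : Int) - 1 - (pvK np m : Int)) := by
  induction fuel generalizing np m with
  | zero => omega
  | succ fuel ih =>
    match m with
    | 0 =>
      simp only [pvALoop, pvK, pvZero, Nat.cast_zero]
      norm_num
    | m + 1 =>
      have e1 : ((m + 1 : Nat) : Int) - 1 = ((m : Nat) : Int) := by push_cast; ring
      rw [e1]
      simp only [pvALoop, PySem.List.pyGetD_natCast, Int.natCast_nonneg, true_and]
      by_cases h1 : np.getD m 0 = 1
      · rw [if_pos h1, PySem.List.pySetD_natCast]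
        rw [ih (np.set m 0) m (by simpa using by omega) (by omega)]
        have hK : pvK (np.set m 0) m = pvK np m := by
          apply pvK_congr
          intro j hj
          simp [List.getD_eq_getElem?_getD, List.getElem?_set_ne (by omega : m ≠ j)]
        rw [hK, pvK_pos_head np m h1]
        have eZ : pvZero np (m + 1) (pvK np m + 1) = pvZero (np.set m 0) m (pvK np m) := by
          simp only [pvZero, Nat.add_sub_cancel]
        rw [eZ]
        have eI : ((m : Nat) : Int) - ((pvK np m + 1 : Nat) : Int)
            = ((m : Nat) : Int) - 1 - ((pvK np m : Nat) : Int) := by omega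
        rw [eI]
      · rw [if_neg h1, pvK_zero_head np m h1]
        simp [pvZero]

lemma pvZero_eq (k m : Nat) (np : List Int) (hk : k ≤ m) (hm : m ≤ np.length) :
    pvZero np m k = np.take (m - k) ++ List.replicate k 0 ++ np.drop m := by
  induction k generalizing np m with
  | zero => simp [pvZero]
  | succ k ih =>
    have hm1 : m - 1 < np.length := by omega
    simp only [pvZero]
    rw [ih (m - 1) (np.set (m - 1) 0) (by omega) (by rw [List.length_set]; omega)]
    rw [List.take_set, List.set_eq_of_length_le (by rw [List.length_take]; omega)]
    rw [List.drop_set, if_neg (by omega), Nat.sub_self]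
    rw [List.drop_eq_getElem_cons hm1]
    simp only [List.set_cons_zero]
    rw [show m - 1 + 1 = m by omega, show m - 1 - k = m - (k + 1) by omega,
        List.replicate_succ']
    simp [List.append_assoc]

-- A's updated counter equals the canonical form
lemma pvA_np1_eq (np : List Int) (hne : np ≠ []) :
    (if PySem.List.pyGetD np ((np.length : Int) - 1) 0 = 0 then
       PySem.List.pySetD np ((np.length : Int) - 1) 1
     else
       let r := pvALoop np ((np.length : Int) - 1) (np.length + 1)
       if 0 ≤ r.2 then PySem.List.pySetD r.1 r.2 1 else r.1)
    = pvForm np := by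
  have hn1 : 1 ≤ np.length := by cases np <;> simp_all
  set n := np.length with hn
  have hlast : (n : Int) - 1 = ((n - 1 : Nat) : Int) := by omega
  have hget : PySem.List.pyGetD np ((n : Int) - 1) 0 = np.getD (n - 1) 0 := by
    rw [hlast, PySem.List.pyGetD_natCast]
  have hKle := pvK_le np n
  have hset0 : ∀ k, k = pvK np n → k = 0 →
      PySem.List.pySetD np ((n : Int) - 1) 1 = pvForm np := by
    intro k hkdef hk0
    rw [hlast, PySem.List.pySetD_natCast]
    unfold pvForm
    rw [← hn, ← hkdef, hk0]
    rw [if_neg (by omega), List.set_eq_take_append_cons_drop, if_pos (by rw [← hn]; omega)]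
    rw [show n - 1 + 1 = n by omega, show List.drop n np = [] from by rw [hn]; exact List.drop_length]
    simp
  by_cases h0 : np.getD (n - 1) 0 = 0
  · -- last cell is 0: A sets it to 1; the trailing 1-run is empty
    have hk0 : pvK np n = 0 := by
      rw [show n = (n - 1) + 1 by omega, pvK_zero_head np (n - 1) (by rw [h0]; decide)]
    rw [if_pos (by rw [hget]; exact h0)]
    exact hset0 _ rfl hk0
  · rw [if_neg (by rw [hget]; exact h0)]
    have hloop := pvALoop_spec np n (n + 1) (by omega) (by omega)
    simp only [hloop]
    by_cases h1 : np.getD (n - 1) 0 = 1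
    · -- trailing run is nonempty: the loop zeroes it
      have hkpos : 1 ≤ pvK np n := by
        rw [show n = (n - 1) + 1 by omega, pvK_pos_head np (n - 1) h1]; omega
      rw [pvZero_eq (pvK np n) n np hKle (by omega)]
      rw [show List.drop n np = [] from by rw [hn]; exact List.drop_length, List.append_nil]
      unfold pvForm
      rw [← hn]
      by_cases hkn : pvK np n = n
      · rw [if_neg (show ¬ (0 : Int) ≤ (n : Int) - 1 - ((pvK np n : Nat) : Int) by omega),
            if_pos hkn, hkn]
        simp
      · rw [if_pos (show (0 : Int) ≤ (n : Int) - 1 - ((pvK np n : Nat) : Int) by omega),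
            if_neg hkn]
        rw [show (n : Int) - 1 - ((pvK np n : Nat) : Int) = ((n - 1 - pvK np n : Nat) : Int) by omega,
            PySem.List.pySetD_natCast]
        rw [List.set_append]
        rw [if_pos (by rw [List.length_take]; omega)]
        rw [List.set_eq_take_append_cons_drop, if_pos (by rw [List.length_take]; omega)]
        rw [List.take_take, min_eq_left (by omega), List.drop_take]
        rw [show n - 1 - pvK np n = n - pvK np n - 1 by omega]
        simp
        omega
    · -- last cell is neither 0 nor 1: the while loop exits at once, A sets the last cell to 1
      have hk0 : pvK np n = 0 := by
        rw [show n = (n - 1) + 1 by omega, pvK_zero_head np (n - 1) h1]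
      simp only [hk0]
      rw [pvZero_eq 0 n np (by omega) (by omega)]
      simp only [Nat.sub_zero, List.replicate_zero, List.append_nil]
      rw [hn, List.take_length, List.drop_length, List.append_nil, ← hn]
      rw [if_pos (by omega),
          show (n : Int) - 1 - ((0 : Nat) : Int) = (n : Int) - 1 by push_cast; ring]
      exact hset0 _ rfl hk0

-- pvLead = length of the leading run of 1s; pvSetHead1 sets the head (if any) to 1
def pvLead : List Int → Nat
  | [] => 0
  | h :: t => if h = 1 then pvLead t + 1 else 0

def pvSetHead1 : List Int → List Int
  | [] => []
  | _ :: t => 1 :: t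

lemma pvInc_eq (rv : List Int) :
    pvInc rv = List.replicate (pvLead rv) 0 ++ pvSetHead1 (rv.drop (pvLead rv)) := by
  induction rv with
  | nil => rfl
  | cons h t ih =>
    by_cases h1 : h = 1
    · simp only [pvInc, pvLead, if_pos h1, ih, List.replicate_succ, List.cons_append,
        List.drop_succ_cons]
    · simp only [pvInc, pvLead, if_neg h1, List.replicate_zero, List.nil_append,
        List.drop_zero, pvSetHead1]

lemma pvLead_reverse (np : List Int) : pvLead np.reverse = pvK np np.length := by
  induction np using List.reverseRecOn with
  | nil => rfl
  | append_singleton ys a ih =>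
    rw [List.reverse_append, List.reverse_singleton, List.singleton_append]
    simp only [pvLead, List.length_append, List.length_singleton]
    have hget : (ys ++ [a]).getD ys.length 0 = a := by
      simp [List.getD_eq_getElem?_getD]
    have hKpre : pvK (ys ++ [a]) ys.length = pvK ys ys.length := by
      apply pvK_congr
      intro j hj
      simp [List.getD_eq_getElem?_getD, List.getElem?_append_left hj]
    by_cases h1 : a = 1
    · rw [if_pos h1, ih, pvK_pos_head (ys ++ [a]) ys.length (by rw [hget]; exact h1), hKpre]
    · rw [if_neg h1, pvK_zero_head (ys ++ [a]) ys.length (by rw [hget]; exact h1)]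

-- B's updated counter equals the canonical form
lemma pvB_updated_eq (np : List Int) :
    (pvInc np.reverse).reverse = pvForm np := by
  set n := np.length with hn
  have hKle := pvK_le np n
  rw [pvInc_eq, pvLead_reverse, ← hn]
  set k := pvK np n with hk
  have hdrop : np.reverse.drop k = (np.take (n - k)).reverse := by
    rw [List.reverse_take, hn, show np.length - (np.length - k) = k by omega]
  unfold pvForm
  rw [← hn, ← hk]
  by_cases hkn : k = n
  · rw [if_pos hkn, hdrop, hkn, Nat.sub_self, List.take_zero, List.reverse_nil]
    simp [pvSetHead1, List.reverse_replicate]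
  · rw [if_neg hkn]
    have hlt : n - k - 1 < np.length := by omega
    have htake : np.take (n - k) = np.take (n - k - 1) ++ (np[n - k - 1]?).toList := by
      rw [show n - k = (n - k - 1) + 1 by omega]
      exact List.take_add_one
    rw [hdrop, htake, List.getElem?_eq_getElem hlt]
    simp only [Option.toList_some, List.reverse_append, pvSetHead1, List.reverse_cons,
      List.reverse_replicate]
    simp [List.append_assoc]

lemma pvForm_length (np : List Int) : (pvForm np).length = np.length := by
  unfold pvForm
  have := pvK_le np np.length
  split
  · simp [*]
  · simp only [List.length_append, List.length_take, List.length_cons, List.length_replicate]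
    omega

-- the two result-building steps agree once they read the same updated counter
lemma pvSel_eq (xs ds : List Int) (h : ds.length ≤ xs.length) :
    (PySem.List.pyRange 0 (ds.length : Int) 1).foldl
      (fun acc j => if PySem.List.pyGetD xs j 0 = 1 then acc ++ [PySem.List.pyGetD ds j 0] else acc) []
    = ((xs.zip ds).filter (fun pd => pd.1 = 1)).map Prod.snd := by
  have hz : (xs.zip ds).length = ds.length := by rw [List.length_zip]; omega
  have hcong : (PySem.List.pyRange 0 (ds.length : Int) 1).foldl
      (fun acc j => if PySem.List.pyGetD xs j 0 = 1 then acc ++ [PySem.List.pyGetD ds j 0] else acc) []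
      = (PySem.List.pyRange 0 ((xs.zip ds).length : Int) 1).foldl
      (fun acc j => (fun a (pd : Int × Int) => if pd.1 = 1 then a ++ [pd.2] else a) acc
        (PySem.List.pyGetD (xs.zip ds) j (0, 0))) [] := by
    rw [hz]
    apply PySem.List.foldl_congr_mem
    intro acc x hx
    have hb := PySem.List.mem_pyRange_one.mp hx
    have hx1 : x < (xs.length : Int) := by omega
    have hx2 : x < ((xs.zip ds).length : Int) := by omega
    rw [PySem.List.pyGetD_eq_getElem xs 0 hb.1 hx1,
        PySem.List.pyGetD_eq_getElem ds 0 hb.1 (by omega),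
        PySem.List.pyGetD_eq_getElem (xs.zip ds) (0, 0) hb.1 hx2,
        List.getElem_zip]
  rw [hcong, PySem.List.foldl_pyRange_zero_pyGetD' (xs.zip ds) (0, 0)
      (fun a (pd : Int × Int) => if pd.1 = 1 then a ++ [pd.2] else a) []]
  have := PySem.List.foldl_append_if (fun pd : Int × Int => pd.1 == 1) Prod.snd (xs.zip ds) []
  simp only [beq_iff_eq] at this
  simpa using this

-- ===== VERDICT (by name: the statement is the Claim_ definition above) =====
theorem increment_and_return_permutation_spec : Claim_equal_increment_and_return_permutation := by
  intro np ds _ hpre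
  obtain ⟨hne, hlen⟩ := hpre
  unfold Spec_increment_and_return_permutation
  unfold increment_and_return_permutation increment_and_return_permutation_alt
  simp only []
  rw [pvA_np1_eq np hne, pvB_updated_eq np]
  exact pvSel_eq _ ds (by rw [pvForm_length np]; exact hlen)
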